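-- pv_equiv track=rewrite | github.com/Vasandre/For_education | First task/Cat Dog Years.py | cat_or_dog
-- ===== SOURCE A (Python) =====
-- def cat_or_dog(years, step):
--     old = 0
--
--     for year in range(0, years + 1):
--
--         if year == 15:
--             old += 1
--
--         if 15 < year < 24:
--             continue
--
--         if year == 24:
--             old += 1
--
--         if year > 24 and (year - 24) % step == 0:
--             old += 1
--
--     return old
-- ===== SOURCE B (Python) =====
-- def cat_or_dog(years, step):
--     old = 0
--     if years >= 15:
--         old += 1
--     if years >= 24:
--         old += 1
--     if years > 24:
--         old += (years - 24) // abs(step)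
--     return old
-- ===== Notes on version B (the rewrite author's own statement) =====
-- stated objective: faster
-- what changed: Replaced the O(years) loop over every year with O(1) threshold checks plus one floor division counting the periodic milestones after year 24.
import Mathlib
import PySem

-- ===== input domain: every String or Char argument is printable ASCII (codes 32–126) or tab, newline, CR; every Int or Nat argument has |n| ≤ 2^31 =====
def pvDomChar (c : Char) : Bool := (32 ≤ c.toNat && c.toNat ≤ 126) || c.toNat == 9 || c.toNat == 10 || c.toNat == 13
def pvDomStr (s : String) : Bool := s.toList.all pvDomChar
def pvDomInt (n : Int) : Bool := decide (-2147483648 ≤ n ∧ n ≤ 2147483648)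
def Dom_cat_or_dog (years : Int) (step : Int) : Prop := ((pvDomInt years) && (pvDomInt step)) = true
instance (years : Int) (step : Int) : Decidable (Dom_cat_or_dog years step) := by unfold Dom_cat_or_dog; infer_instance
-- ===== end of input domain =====

-- B replaces A's year-by-year loop with O(1) threshold checks and one floor division.

-- ===== PORT A =====
-- loop body of A's 'for year in range(0, years + 1)'
def catStep (step : Int) (old : Int) (year : Int) : Int :=
  let old := if year = 15 then old + 1 else old
  if 15 < year ∧ year < 24 then old          -- 'continue'
  else
    let old := if year = 24 then old + 1 else old
    if year > 24 ∧ PySem.Int.mod (year - 24) step = 0 then old + 1 else old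

def cat_or_dog (years : Int) (step : Int) : Int :=
  (PySem.List.pyRange 0 (years + 1) 1).foldl (catStep step) 0

-- ===== PORT B =====
def cat_or_dog_alt (years : Int) (step : Int) : Int :=
  let old : Int := 0
  let old := if years ≥ 15 then old + 1 else old
  let old := if years ≥ 24 then old + 1 else old
  if years > 24 then old + PySem.Int.floordiv (years - 24) |step| else old

-- ===== PRECONDITION & SPEC =====
-- Pre_ excludes exactly the inputs where A raises ZeroDivisionError ('% step' with step = 0,
-- reached only once the loop passes year 24); B raises there too (abs(step) divisor is 0).
def Pre_cat_or_dog (years : Int) (step : Int) : Prop := years ≤ 24 ∨ step ≠ 0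
instance (years : Int) (step : Int) : Decidable (Pre_cat_or_dog years step) := by unfold Pre_cat_or_dog; infer_instance
def pvWitness_cat_or_dog : Int × Int := (30, 7)

def Spec_cat_or_dog (years : Int) (step : Int) (out : Int) : Prop := out = cat_or_dog_alt years step
instance (years : Int) (step : Int) (out : Int) : Decidable (Spec_cat_or_dog years step out) := by unfold Spec_cat_or_dog; infer_instance

-- ===== CLAIM (what is proved, stated in full; the proofs are below) =====
def Claim_equal_cat_or_dog : Prop := ∀ (years : Int) (step : Int), Dom_cat_or_dog years step → Pre_cat_or_dog years step → Spec_cat_or_dog years step (cat_or_dog years step)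

-- ===== LEMMAS AND PROOFS =====

-- one extra year past 24: the floor-division count grows by 1 exactly at multiples of s
lemma fd_succ (s k : Int) (hs : 0 < s) (_hk : 1 ≤ k) :
    PySem.Int.floordiv k s
      = PySem.Int.floordiv (k - 1) s + (if s ∣ k then 1 else 0) := by
  obtain ⟨h1, h2⟩ := (PySem.Int.floordiv_eq_iff_of_pos (a := k - 1) (b := s)
      (q := PySem.Int.floordiv (k - 1) s) hs).mp rfl
  set q := PySem.Int.floordiv (k - 1) s with hq
  by_cases hd : s ∣ k
  · rw [if_pos hd]
    apply (PySem.Int.floordiv_eq_iff_of_pos hs).mpr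
    obtain ⟨m, hm⟩ := hd
    have hqm : q < m := by nlinarith
    constructor
    · nlinarith
    · nlinarith
  · rw [if_neg hd, add_zero]
    apply (PySem.Int.floordiv_eq_iff_of_pos hs).mpr
    refine ⟨by linarith, lt_of_le_of_ne (by linarith) ?_⟩
    intro he
    exact hd ⟨q + 1, by linarith⟩

lemma fd_zero (s : Int) (hs : 0 < s) : PySem.Int.floordiv 0 s = 0 := by
  rw [PySem.Int.floordiv_eq_ediv_of_pos hs]; exact Int.zero_ediv s

lemma alt_ge24 (step m : Int) (hs : step ≠ 0) (hm : 24 ≤ m) :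
    cat_or_dog_alt m step = 2 + PySem.Int.floordiv (m - 24) |step| := by
  have habs : 0 < |step| := abs_pos.mpr hs
  simp only [cat_or_dog_alt]
  rcases lt_or_ge 24 m with h | h
  · simp only [if_pos (by omega : m ≥ 15), if_pos (by omega : m ≥ 24), if_pos h]; ring
  · have hm24 : m = 24 := le_antisymm h hm
    subst hm24
    simp [fd_zero _ habs]

set_option maxHeartbeats 1000000 in
lemma loop_eq (step : Int) (n : Nat) (h : (n : Int) ≤ 24 ∨ step ≠ 0) :
    (PySem.List.pyRange 0 ((n : Int) + 1) 1).foldl (catStep step) 0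
      = cat_or_dog_alt (n : Int) step := by
  induction n with
  | zero =>
    rw [show ((0 : Nat) : Int) + 1 = 0 + 1 from by norm_num,
        PySem.List.pyRange_one_singleton]
    simp [catStep, cat_or_dog_alt, PySem.Int.mod]
  | succ n ih =>
    have hcast : ((n + 1 : Nat) : Int) = (n : Int) + 1 := by push_cast; ring
    rw [hcast, PySem.List.pyRange_one_succ_right (by positivity), List.foldl_append,
        ih (h.imp (fun hh => by omega) id)]
    simp only [List.foldl_cons, List.foldl_nil]
    set y : Int := (n : Int) + 1 with hy
    by_cases hgt : 24 < y
    · have hs : step ≠ 0 := by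
        rcases h with h | h
        · omega
        · exact h
      have habs : 0 < |step| := abs_pos.mpr hs
      rw [alt_ge24 step y hs (by omega), alt_ge24 step (n : Int) hs (by omega)]
      simp only [catStep]
      rw [if_neg (by omega : ¬ (y : Int) = 15), if_neg (by omega : ¬ (15 < y ∧ y < 24)),
          if_neg (by omega : ¬ (y : Int) = 24)]
      have hdvd : PySem.Int.mod (y - 24) step = 0 ↔ |step| ∣ (y - 24) := by
        rw [PySem.Int.mod_eq_zero_iff_dvd]; exact (abs_dvd step (y - 24)).symm
      have hk : (n : Int) - 24 = (y - 24) - 1 := by omega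
      rw [hk, fd_succ |step| (y - 24) habs (by omega)]
      by_cases hd : |step| ∣ (y - 24)
      · rw [if_pos ⟨hgt, hdvd.mpr hd⟩, if_pos hd]; ring
      · rw [if_neg (fun hc => hd (hdvd.mp hc.2)), if_neg hd]; ring
    · simp only [catStep, cat_or_dog_alt]
      split_ifs <;> omega

-- ===== VERDICT (by name: the statement is the Claim_ definition above) =====
theorem cat_or_dog_spec : Claim_equal_cat_or_dog := by
  intro years step _ hpre
  unfold Spec_cat_or_dog cat_or_dog
  rcases lt_or_ge years 0 with hneg | hpos
  · rw [PySem.List.pyRange_one_eq_nil (by omega)]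
    simp only [List.foldl_nil, cat_or_dog_alt]
    rw [if_neg (by omega : ¬ years ≥ 15), if_neg (by omega : ¬ years ≥ 24),
        if_neg (by omega : ¬ years > 24)]
  · obtain ⟨n, rfl⟩ : ∃ n : Nat, years = (n : Int) := ⟨years.toNat, by omega⟩
    rw [loop_eq step n hpre]
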